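-- pv_equiv track=rewrite | github.com/mathiassandnes/QuantumDQN | source/quantum_utils.py | count_entanglement_gates
-- ===== SOURCE A (Python) =====
-- def count_entanglement_gates(qubits, scheme):
--     count = 0
--     for s in scheme:
--         match s:
--             case 'ladder':
--                 count += (qubits - 1)
--             case 'double ladder':
--                 count += 2 * (qubits - 1)
--             case 'full':
--                 count += (qubits * (qubits - 1)) // 2
--             case 'none':
--                 pass
--
--     return count
-- ===== SOURCE B (Python) =====
-- def count_entanglement_gates(qubits, scheme):
--     return (scheme.count('ladder') * (qubits - 1)
--             + scheme.count('double ladder') * (2 * (qubits - 1))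
--             + scheme.count('full') * ((qubits * (qubits - 1)) // 2))
-- ===== Notes on version B (the rewrite author's own statement) =====
-- stated objective: simpler
-- what changed: Replaces the per-element match/accumulator loop with a tally-then-formula: count the occurrences of each recognised scheme name once and return one closed-form weighted sum.
import Mathlib
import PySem

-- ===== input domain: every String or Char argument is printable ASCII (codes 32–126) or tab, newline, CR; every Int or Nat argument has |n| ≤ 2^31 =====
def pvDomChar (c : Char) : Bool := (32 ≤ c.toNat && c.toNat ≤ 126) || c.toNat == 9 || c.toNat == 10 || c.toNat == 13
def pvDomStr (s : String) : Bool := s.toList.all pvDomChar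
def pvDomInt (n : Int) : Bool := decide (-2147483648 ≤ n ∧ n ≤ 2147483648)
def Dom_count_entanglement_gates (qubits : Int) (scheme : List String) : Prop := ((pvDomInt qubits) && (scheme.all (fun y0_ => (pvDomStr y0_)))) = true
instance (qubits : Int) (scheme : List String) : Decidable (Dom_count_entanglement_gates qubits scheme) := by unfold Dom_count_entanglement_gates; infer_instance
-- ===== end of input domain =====

/- B replaces the per-element match/accumulator loop with three occurrence counts and one closed-form weighted sum (objective: simpler). -/


-- ===== PORT A =====
def count_entanglement_gates (qubits : Int) (scheme : List String) : Int :=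
  scheme.foldl (fun count s =>
    if s == "ladder" then count + (qubits - 1)
    else if s == "double ladder" then count + 2 * (qubits - 1)
    else if s == "full" then count + PySem.Int.floordiv (qubits * (qubits - 1)) 2
    else count) 0

-- ===== PORT B =====
def count_entanglement_gates_alt (qubits : Int) (scheme : List String) : Int :=
  (PySem.List.count scheme "ladder") * (qubits - 1)
  + (PySem.List.count scheme "double ladder") * (2 * (qubits - 1))
  + (PySem.List.count scheme "full") * PySem.Int.floordiv (qubits * (qubits - 1)) 2

-- ===== PRECONDITION & SPEC =====
def Spec_count_entanglement_gates (qubits : Int) (scheme : List String) (out : Int) : Prop := out = count_entanglement_gates_alt qubits scheme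
instance (qubits : Int) (scheme : List String) (out : Int) : Decidable (Spec_count_entanglement_gates qubits scheme out) := by unfold Spec_count_entanglement_gates; infer_instance

-- ===== CLAIM (what is proved, stated in full; the proofs are below) =====
def Claim_equal_count_entanglement_gates : Prop := ∀ (qubits : Int) (scheme : List String), Dom_count_entanglement_gates qubits scheme → Spec_count_entanglement_gates qubits scheme (count_entanglement_gates qubits scheme)

-- ===== LEMMAS AND PROOFS =====

-- ===== VERDICT (by name: the statement is the Claim_ definition above) =====
theorem count_entanglement_gates_fold (qubits : Int) (scheme : List String) (acc : Int) :
    scheme.foldl (fun count s =>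
      if s == "ladder" then count + (qubits - 1)
      else if s == "double ladder" then count + 2 * (qubits - 1)
      else if s == "full" then count + PySem.Int.floordiv (qubits * (qubits - 1)) 2
      else count) acc
    = acc + (PySem.List.count scheme "ladder") * (qubits - 1)
      + (PySem.List.count scheme "double ladder") * (2 * (qubits - 1))
      + (PySem.List.count scheme "full") * PySem.Int.floordiv (qubits * (qubits - 1)) 2 := by
  induction scheme generalizing acc with
  | nil => simp [PySem.List.count]
  | cons x xs ih =>
    simp only [List.foldl_cons, ih, PySem.List.count, List.count_cons]
    by_cases h1 : x == "ladder" <;> by_cases h2 : x == "double ladder" <;>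
      by_cases h3 : x == "full" <;>
      simp_all [PySem.List.count] <;> ring

theorem count_entanglement_gates_spec : Claim_equal_count_entanglement_gates := by
  intro qubits scheme _
  unfold Spec_count_entanglement_gates count_entanglement_gates count_entanglement_gates_alt
  rw [count_entanglement_gates_fold]
  ring
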